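-- pv_equiv track=rewrite | github.com/invinciblepythondev-netizen/Deydric-Must-Die | services/item_action_parser.py | _infer_worn_slot
-- ===== SOURCE A (Python) =====
-- from typing import List, Dict, Any, Optional
--
-- def _infer_worn_slot(item: Dict[str, Any]) -> str:
--     """
--     Infer body slot from item type and name.
--
--     Returns: head, torso, legs, feet, hands, neck, finger, waist, back
--     """
--     item_name = item['item_name'].lower()
--     item_type = item.get('item_type', '').lower()
--
--     # Check name keywords
--     if any(word in item_name for word in ['helmet', 'hat', 'crown', 'hood', 'cap']):
--         return 'head'
--     elif any(word in item_name for word in ['shirt', 'tunic', 'robe', 'vest', 'armor', 'dress', 'gown']):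
--         return 'torso'
--     elif any(word in item_name for word in ['pants', 'trousers', 'leggings', 'skirt']):
--         return 'legs'
--     elif any(word in item_name for word in ['boots', 'shoes', 'sandals', 'slippers']):
--         return 'feet'
--     elif any(word in item_name for word in ['gloves', 'gauntlets', 'mittens']):
--         return 'hands'
--     elif any(word in item_name for word in ['necklace', 'pendant', 'amulet', 'collar']):
--         return 'neck'
--     elif any(word in item_name for word in ['ring', 'band']):
--         return 'finger'
--     elif any(word in item_name for word in ['belt', 'sash', 'girdle']):
--         return 'waist'
--     elif any(word in item_name for word in ['cloak', 'cape', 'mantle']):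
--         return 'back'
--
--     # Fallback to item type
--     if item_type == 'clothing':
--         return 'torso'  # Default clothing slot
--
--     return 'torso'  # Ultimate fallback
-- ===== SOURCE B (Python) =====
-- # B: min-priority lookup over a flat keyword->priority dict instead of an if/elif chain.
-- _SLOTS = ['head', 'torso', 'legs', 'feet', 'hands', 'neck', 'finger', 'waist', 'back', 'torso']
--
-- _KEYWORD_PRIORITY = {}
-- for _p, _words in enumerate([
--         ['helmet', 'hat', 'crown', 'hood', 'cap'],
--         ['shirt', 'tunic', 'robe', 'vest', 'armor', 'dress', 'gown'],
--         ['pants', 'trousers', 'leggings', 'skirt'],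
--         ['boots', 'shoes', 'sandals', 'slippers'],
--         ['gloves', 'gauntlets', 'mittens'],
--         ['necklace', 'pendant', 'amulet', 'collar'],
--         ['ring', 'band'],
--         ['belt', 'sash', 'girdle'],
--         ['cloak', 'cape', 'mantle']]):
--     for _w in _words:
--         _KEYWORD_PRIORITY[_w] = _p
--
-- def _infer_worn_slot(item):
--     name = item['item_name'].lower()
--     best = min((p for w, p in _KEYWORD_PRIORITY.items() if w in name), default=9)
--     return _SLOTS[best]
-- ===== Notes on version B (the rewrite author's own statement) =====
-- stated objective: alternative
-- what changed: Replaces the 9-branch if/elif first-match chain (and its redundant item_type fallback that returns 'torso' either way) with an inverted flat keyword->priority dict: B takes the minimum priority among all matching keywords (default 9) and indexes a slot table, instead of short-circuiting branch by branch.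
import Mathlib
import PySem

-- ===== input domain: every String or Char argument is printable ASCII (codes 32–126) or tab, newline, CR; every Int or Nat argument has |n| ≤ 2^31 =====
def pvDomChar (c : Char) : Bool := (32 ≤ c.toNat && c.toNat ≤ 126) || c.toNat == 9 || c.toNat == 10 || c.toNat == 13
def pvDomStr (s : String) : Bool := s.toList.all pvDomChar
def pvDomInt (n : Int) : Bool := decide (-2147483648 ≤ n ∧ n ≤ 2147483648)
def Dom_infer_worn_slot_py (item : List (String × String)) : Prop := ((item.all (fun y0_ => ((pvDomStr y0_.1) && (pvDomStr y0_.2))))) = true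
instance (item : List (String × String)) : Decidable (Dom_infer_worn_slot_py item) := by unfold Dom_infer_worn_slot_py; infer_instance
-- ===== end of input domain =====

-- B replaces A's 9-branch if/elif chain (and its redundant item_type fallback) with a min-priority lookup over a flat keyword->priority table indexed into a slot list; objective: alternative, same cost. A raises KeyError without 'item_name': excluded by Pre_.


-- ===== PORT A =====
-- Literal port of A's if/elif keyword chain. item['item_name'] raises KeyError if absent: Pre_ requires the key.
def infer_worn_slot_py (item : List (String × String)) : String :=
  match (PySem.Dict.mk item).get? "item_name" with
  | none => ""  -- KeyError; excluded by Pre_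
  | some raw =>
    let item_name := PySem.Str.lower raw
    let item_type := PySem.Str.lower ((PySem.Dict.mk item).getD "item_type" "")
    if ["helmet", "hat", "crown", "hood", "cap"].any (fun w => PySem.Str.isIn w item_name) then "head"
    else if ["shirt", "tunic", "robe", "vest", "armor", "dress", "gown"].any (fun w => PySem.Str.isIn w item_name) then "torso"
    else if ["pants", "trousers", "leggings", "skirt"].any (fun w => PySem.Str.isIn w item_name) then "legs"
    else if ["boots", "shoes", "sandals", "slippers"].any (fun w => PySem.Str.isIn w item_name) then "feet"
    else if ["gloves", "gauntlets", "mittens"].any (fun w => PySem.Str.isIn w item_name) then "hands"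
    else if ["necklace", "pendant", "amulet", "collar"].any (fun w => PySem.Str.isIn w item_name) then "neck"
    else if ["ring", "band"].any (fun w => PySem.Str.isIn w item_name) then "finger"
    else if ["belt", "sash", "girdle"].any (fun w => PySem.Str.isIn w item_name) then "waist"
    else if ["cloak", "cape", "mantle"].any (fun w => PySem.Str.isIn w item_name) then "back"
    else if item_type == "clothing" then "torso"
    else "torso"

-- ===== PORT B =====
-- B: slot table indexed by the minimum priority of any matching keyword (default 9).
def pvSlots : List String :=
  ["head", "torso", "legs", "feet", "hands", "neck", "finger", "waist", "back", "torso"]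

-- the flat keyword -> priority table Source B builds once at module load (group i gets priority i)
def pvKeywordPriority : List (String × Nat) :=
  [("helmet", 0), ("hat", 0), ("crown", 0), ("hood", 0), ("cap", 0),
   ("shirt", 1), ("tunic", 1), ("robe", 1), ("vest", 1), ("armor", 1), ("dress", 1), ("gown", 1),
   ("pants", 2), ("trousers", 2), ("leggings", 2), ("skirt", 2),
   ("boots", 3), ("shoes", 3), ("sandals", 3), ("slippers", 3),
   ("gloves", 4), ("gauntlets", 4), ("mittens", 4),
   ("necklace", 5), ("pendant", 5), ("amulet", 5), ("collar", 5),
   ("ring", 6), ("band", 6),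
   ("belt", 7), ("sash", 7), ("girdle", 7),
   ("cloak", 8), ("cape", 8), ("mantle", 8)]

def infer_worn_slot_py_alt (item : List (String × String)) : String :=
  match (PySem.Dict.mk item).get? "item_name" with
  | none => ""  -- KeyError; excluded by Pre_
  | some raw =>
    let name := PySem.Str.lower raw
    -- min((p for w, p in _KEYWORD_PRIORITY.items() if w in name), default=9)
    let best :=
      (((pvKeywordPriority.filter (fun wp => PySem.Str.isIn wp.1 name)).map (fun wp => wp.2)).foldl
        min 9)
    pvSlots.getD best "torso"  -- _SLOTS[best]: best is always 0..9, in range of the 10-entry table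

-- ===== PRECONDITION & SPEC =====
-- Pre_ excludes items without an 'item_name' key, on which Python A raises KeyError.
def Pre_infer_worn_slot_py (item : List (String × String)) : Prop :=
  item.any (fun kv => kv.1 == "item_name") = true
instance (item : List (String × String)) : Decidable (Pre_infer_worn_slot_py item) := by unfold Pre_infer_worn_slot_py; infer_instance
def pvWitness_infer_worn_slot_py : (List (String × String)) := [("item_name", "iron helmet")]
def Spec_infer_worn_slot_py (item : List (String × String)) (out : String) : Prop := out = infer_worn_slot_py_alt item
instance (item : List (String × String)) (out : String) : Decidable (Spec_infer_worn_slot_py item out) := by unfold Spec_infer_worn_slot_py; infer_instance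

-- ===== CLAIM (what is proved, stated in full; the proofs are below) =====
def Claim_equal_infer_worn_slot_py : Prop := ∀ (item : List (String × String)), Dom_infer_worn_slot_py item → Pre_infer_worn_slot_py item → Spec_infer_worn_slot_py item (infer_worn_slot_py item)

-- ===== LEMMAS AND PROOFS =====
-- folding min over one constant-priority group: matches iff the group's 'any' holds
theorem pvGroupFold (name : String) (words : List String) (p acc : Nat) :
    ((((words.map (fun w => (w, p))).filter (fun wp => PySem.Str.isIn wp.1 name)).map
        (fun wp => wp.2)).foldl min acc)
    = if words.any (fun w => PySem.Str.isIn w name) then min acc p else acc := by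
  induction words generalizing acc with
  | nil => simp
  | cons w ws ih =>
    simp only [List.map_cons, List.filter_cons, List.any_cons]
    by_cases h : PySem.Str.isIn w name = true
    · rw [if_pos h]
      simp only [List.map_cons, List.foldl_cons, ih, h, Bool.true_or]
      split
      · rw [min_assoc, min_self]; simp
      · rfl
    · rw [if_neg h]
      rw [Bool.not_eq_true] at h
      simp only [h, Bool.false_or, ih]

-- ===== VERDICT (by name: the statement is the Claim_ definition above) =====
set_option maxHeartbeats 2000000 in
theorem infer_worn_slot_py_spec : Claim_equal_infer_worn_slot_py := by
  intro item _ _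
  unfold Spec_infer_worn_slot_py infer_worn_slot_py infer_worn_slot_py_alt
  cases h : (PySem.Dict.mk item).get? "item_name" with
  | none => rfl
  | some raw =>
    dsimp only
    rw [show pvKeywordPriority =
        (["helmet", "hat", "crown", "hood", "cap"].map (fun w => (w, 0)))
        ++ (["shirt", "tunic", "robe", "vest", "armor", "dress", "gown"].map (fun w => (w, 1)))
        ++ (["pants", "trousers", "leggings", "skirt"].map (fun w => (w, 2)))
        ++ (["boots", "shoes", "sandals", "slippers"].map (fun w => (w, 3)))
        ++ (["gloves", "gauntlets", "mittens"].map (fun w => (w, 4)))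
        ++ (["necklace", "pendant", "amulet", "collar"].map (fun w => (w, 5)))
        ++ (["ring", "band"].map (fun w => (w, 6)))
        ++ (["belt", "sash", "girdle"].map (fun w => (w, 7)))
        ++ (["cloak", "cape", "mantle"].map (fun w => (w, 8))) from rfl]
    simp only [List.filter_append, List.map_append, List.foldl_append, pvGroupFold]
    generalize (["helmet", "hat", "crown", "hood", "cap"].any (fun w => PySem.Str.isIn w (PySem.Str.lower raw))) = b0
    generalize (["shirt", "tunic", "robe", "vest", "armor", "dress", "gown"].any (fun w => PySem.Str.isIn w (PySem.Str.lower raw))) = b1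
    generalize (["pants", "trousers", "leggings", "skirt"].any (fun w => PySem.Str.isIn w (PySem.Str.lower raw))) = b2
    generalize (["boots", "shoes", "sandals", "slippers"].any (fun w => PySem.Str.isIn w (PySem.Str.lower raw))) = b3
    generalize (["gloves", "gauntlets", "mittens"].any (fun w => PySem.Str.isIn w (PySem.Str.lower raw))) = b4
    generalize (["necklace", "pendant", "amulet", "collar"].any (fun w => PySem.Str.isIn w (PySem.Str.lower raw))) = b5
    generalize (["ring", "band"].any (fun w => PySem.Str.isIn w (PySem.Str.lower raw))) = b6
    generalize (["belt", "sash", "girdle"].any (fun w => PySem.Str.isIn w (PySem.Str.lower raw))) = b7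
    generalize (["cloak", "cape", "mantle"].any (fun w => PySem.Str.isIn w (PySem.Str.lower raw))) = b8
    generalize (PySem.Str.lower ((PySem.Dict.mk item).getD "item_type" "") == "clothing") = b9
    revert b0 b1 b2 b3 b4 b5 b6 b7 b8 b9
    decide
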